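-- pv_equiv track=rewrite | github.com/moradadidi/similarit- | synonyme.py | preprocess_word
-- ===== SOURCE A (Python) =====
-- def preprocess_word(word):
--     """Preprocess word by splitting camelCase and removing special characters."""
--     # Split camelCase
--     words = []
--     current_word = word[0]
--     for c in word[1:]:
--         if c.isupper():
--             words.append(current_word.lower())
--             current_word = c
--         else:
--             current_word += c
--     words.append(current_word.lower())
--     return ' '.join(words)
-- ===== SOURCE B (Python) =====
-- def preprocess_word(word):
--     """Split camelCase into space-separated lowercase words, as a single
--     char-to-piece map joined once (no token list / current-word accumulator)."""
--     return word[0].lower() + ''.join(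
--         ' ' + c.lower() if c.isupper() else c.lower() for c in word[1:])
-- ===== Notes on version B (the rewrite author's own statement) =====
-- stated objective: simpler
-- what changed: A maintains a token list and a growing current_word and lowercases per token; B maps each character directly to its output piece (a space prefix exactly when it is uppercase, lowercased char) and joins once, with no token accumulator.
import Mathlib
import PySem

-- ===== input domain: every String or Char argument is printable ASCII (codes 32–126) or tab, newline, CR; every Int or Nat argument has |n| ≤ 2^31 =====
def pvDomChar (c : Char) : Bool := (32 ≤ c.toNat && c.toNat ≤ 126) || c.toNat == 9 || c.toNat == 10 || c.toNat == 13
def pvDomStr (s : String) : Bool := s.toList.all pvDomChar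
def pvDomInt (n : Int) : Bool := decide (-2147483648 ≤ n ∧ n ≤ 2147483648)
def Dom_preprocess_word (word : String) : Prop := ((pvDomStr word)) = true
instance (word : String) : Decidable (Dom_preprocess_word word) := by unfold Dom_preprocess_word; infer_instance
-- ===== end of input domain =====

-- B replaces A's token-list + current-word accumulator by a per-character map joined once (objective: simpler); both raise IndexError on "" (excluded by Pre_).

-- ===== PORT A =====
-- one loop step of A: append lowered current word on an uppercase char, else extend it
def pvStepA (st : List (List Char) × List Char) (c : Char) : List (List Char) × List Char :=
  if PySem.Chars.isupper c then (st.1 ++ [PySem.Chars.lower st.2], [c])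
  else (st.1, st.2 ++ [c])

def preprocess_word (word : String) : String :=
  match word.toList with
  | [] => ""        -- Python: word[0] raises IndexError here; excluded by Pre_
  | h :: t =>
    let st := t.foldl pvStepA ([], [h])
    String.ofList (PySem.Chars.join [' '] (st.1 ++ [PySem.Chars.lower st.2]))

-- ===== PORT B =====
-- B's per-character piece: ' ' + c.lower() if c.isupper() else c.lower()
def pvPieceB (c : Char) : List Char :=
  if PySem.Chars.isupper c then ' ' :: [PySem.Chars.lowerChar c] else [PySem.Chars.lowerChar c]

def preprocess_word_alt (word : String) : String :=
  match word.toList with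
  | [] => ""        -- Python: word[0] raises IndexError here; excluded by Pre_
  | h :: t =>
    String.ofList (PySem.Chars.lower [h] ++ PySem.Chars.join [] (t.map pvPieceB))

-- ===== PRECONDITION & SPEC =====
-- Pre_ excludes only the empty string, on which both Pythons raise IndexError (word[0]).
def Pre_preprocess_word (word : String) : Prop := word ≠ ""
instance (word : String) : Decidable (Pre_preprocess_word word) := by unfold Pre_preprocess_word; infer_instance
def pvWitness_preprocess_word : String := "camelCase"

def Spec_preprocess_word (word : String) (out : String) : Prop := out = preprocess_word_alt word
instance (word : String) (out : String) : Decidable (Spec_preprocess_word word out) := by unfold Spec_preprocess_word; infer_instance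

-- ===== CLAIM (what is proved, stated in full; the proofs are below) =====
def Claim_equal_preprocess_word : Prop := ∀ (word : String), Dom_preprocess_word word → Pre_preprocess_word word → Spec_preprocess_word word (preprocess_word word)

-- ===== LEMMAS AND PROOFS =====

-- joining a nonempty tail: join sep (x :: l) = x ++ sep ++ join sep l
lemma pv_join_cons (sep x : List Char) (l : List (List Char)) (h : l ≠ []) :
    PySem.Chars.join sep (x :: l) = x ++ sep ++ PySem.Chars.join sep l := by
  cases l with
  | nil => exact absurd rfl h
  | cons y ys => simp [PySem.Chars.join_cons_cons]

-- A's accumulator threads through unchanged previously finished words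
lemma pv_shift (t : List Char) (ws : List (List Char)) (cur : List Char) :
    t.foldl pvStepA (ws, cur)
      = (ws ++ (t.foldl pvStepA ([], cur)).1, (t.foldl pvStepA ([], cur)).2) := by
  induction t generalizing ws cur with
  | nil => simp
  | cons c rs ih =>
    simp only [List.foldl_cons, pvStepA]
    by_cases hc : PySem.Chars.isupper c
    · rw [if_pos hc, if_pos hc]
      simp only [List.nil_append]
      rw [ih (ws ++ [PySem.Chars.lower cur]) [c], ih [PySem.Chars.lower cur] [c]]
      simp
    · rw [if_neg hc, if_neg hc]
      exact ih ws (cur ++ [c])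

-- core invariant: A's join of tokens equals cur lowered followed by B's per-char pieces
lemma pv_main (t : List Char) (cur : List Char) :
    PySem.Chars.join [' ']
        ((t.foldl pvStepA ([], cur)).1 ++ [PySem.Chars.lower (t.foldl pvStepA ([], cur)).2])
      = PySem.Chars.lower cur ++ PySem.Chars.join [] (t.map pvPieceB) := by
  induction t generalizing cur with
  | nil => simp [PySem.Chars.join_singleton, PySem.Chars.join_nil]
  | cons c rs ih =>
    simp only [List.foldl_cons, pvStepA, List.map_cons]
    by_cases hc : PySem.Chars.isupper c
    · rw [if_pos hc]
      simp only [List.nil_append]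
      rw [pv_shift rs [PySem.Chars.lower cur] [c]]
      have hne : (rs.foldl pvStepA ([], [c])).1 ++ [PySem.Chars.lower (rs.foldl pvStepA ([], [c])).2] ≠ [] := by
        simp
      rw [List.append_assoc, List.singleton_append,
          pv_join_cons [' '] (PySem.Chars.lower cur) _ hne, ih [c]]
      by_cases hrs : rs = []
      · subst hrs
        simp [PySem.Chars.join_nil, PySem.Chars.lower, pvPieceB, hc,
              PySem.Chars.join_singleton]
      · have hne2 : rs.map pvPieceB ≠ [] := by simpa using hrs
        rw [pv_join_cons [] (pvPieceB c) _ hne2]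
        simp [PySem.Chars.lower, pvPieceB, hc]
    · rw [if_neg hc]
      rw [ih (cur ++ [c])]
      by_cases hrs : rs = []
      · subst hrs
        simp [PySem.Chars.join_nil, PySem.Chars.lower, pvPieceB, hc,
              PySem.Chars.join_singleton]
      · have hne2 : rs.map pvPieceB ≠ [] := by simpa using hrs
        rw [pv_join_cons [] (pvPieceB c) _ hne2]
        simp [PySem.Chars.lower, pvPieceB, hc]

-- ===== VERDICT (by name: the statement is the Claim_ definition above) =====
theorem preprocess_word_spec : Claim_equal_preprocess_word := by
  intro word _ hpre
  unfold Spec_preprocess_word preprocess_word preprocess_word_alt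
  cases hw : word.toList with
  | nil =>
    exact absurd (by rw [← @String.ofList_toList word, hw]) hpre
  | cons h t =>
    simp only []
    rw [pv_main t [h]]
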